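-- pv_equiv track=rewrite | github.com/crazy-djactor/Science_education | q7/1-2.py | Sometimes_2
-- ===== SOURCE A (Python) =====
-- def Sometimes_2(N):
--     if N < 0:
--         return 0
--     s = 0
--     for i in range(N - 1):
--         for j in range(i, N):
--             s = s + j
--     return s
-- ===== SOURCE B (Python) =====
-- def Sometimes_2(N):
--     # Closed form: sum_{i=0}^{N-2} sum_{j=i}^{N-1} j, computed in O(1).
--     if N < 2:
--         return 0
--     return (N - 1) * (3 * N * (N - 1) - (N - 2) * (N - 3)) // 6
-- ===== Notes on version B (the rewrite author's own statement) =====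
-- stated objective: faster
-- what changed: Replaced the O(N^2) double nested loop accumulating j by a single O(1) closed-form arithmetic-series formula with exact integer division.
import Mathlib
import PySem

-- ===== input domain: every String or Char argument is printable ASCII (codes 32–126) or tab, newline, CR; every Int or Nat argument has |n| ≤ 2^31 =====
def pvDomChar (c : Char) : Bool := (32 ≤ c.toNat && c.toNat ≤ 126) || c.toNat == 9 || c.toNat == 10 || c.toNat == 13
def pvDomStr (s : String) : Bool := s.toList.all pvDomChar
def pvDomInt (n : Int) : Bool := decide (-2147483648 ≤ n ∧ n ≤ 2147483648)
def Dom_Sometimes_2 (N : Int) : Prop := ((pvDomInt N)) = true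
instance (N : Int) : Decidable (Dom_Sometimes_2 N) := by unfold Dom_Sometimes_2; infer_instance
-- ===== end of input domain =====

-- B replaces A's O(N^2) double loop by a closed-form arithmetic-series formula (O(1)).

-- ===== PORT A =====
def Sometimes_2 (N : Int) : Int :=
  if N < 0 then 0
  else
    (PySem.List.pyRange 0 (N - 1) 1).foldl
      (fun s i => (PySem.List.pyRange i N 1).foldl (fun s j => s + j) s) 0

-- ===== PORT B =====
def Sometimes_2_alt (N : Int) : Int :=
  if N < 2 then 0
  else PySem.Int.floordiv ((N - 1) * (3 * N * (N - 1) - (N - 2) * (N - 3))) 6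

-- ===== PRECONDITION & SPEC =====
def Spec_Sometimes_2 (N : Int) (out : Int) : Prop := out = Sometimes_2_alt N
instance (N : Int) (out : Int) : Decidable (Spec_Sometimes_2 N out) := by unfold Spec_Sometimes_2; infer_instance

-- ===== CLAIM (what is proved, stated in full; the proofs are below) =====
def Claim_equal_Sometimes_2 : Prop := ∀ (N : Int), Dom_Sometimes_2 N → Spec_Sometimes_2 N (Sometimes_2 N)

-- ===== LEMMAS AND PROOFS =====

-- doubled sum of range(a,b): 2 * Σ_{j=a}^{b-1} j = (b-a)(a+b-1)
theorem pv_sum_pyRange (a : Int) : ∀ (k : Nat),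
    2 * ((PySem.List.pyRange a (a + k) 1).sum) = (k : Int) * (2 * a + k - 1) := by
  intro k
  induction k with
  | zero => simp [PySem.List.pyRange_one_eq_nil]
  | succ k ih =>
    have h : a ≤ a + (k : Int) := by omega
    have : PySem.List.pyRange a (a + (k : Int) + 1) 1
        = PySem.List.pyRange a (a + (k : Int)) 1 ++ [a + (k : Int)] :=
      PySem.List.pyRange_one_succ_right h
    push_cast
    rw [show a + ((k : Int) + 1) = a + (k : Int) + 1 by ring, this]
    simp only [List.sum_append, List.sum_cons, List.sum_nil]
    push_cast at ih
    linarith [ih]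

-- outer accumulation: 6 * Σ_{i=0}^{m-1} (Σ_{j=i}^{N-1} j) as a polynomial in m, N
theorem pv_outer (N : Int) : ∀ (m : Nat), (m : Int) ≤ N →
    6 * (((PySem.List.pyRange 0 m 1).map
          (fun i => (PySem.List.pyRange i N 1).sum)).sum)
      = 3 * m * (N ^ 2 - N) + (m : Int) * ((m : Int) - 1) * (2 - (m : Int)) := by
  intro m
  induction m with
  | zero => simp [PySem.List.pyRange_one_eq_nil]
  | succ m ih =>
    intro hm
    have hm' : (m : Int) ≤ N := by push_cast at hm; omega
    have hr : PySem.List.pyRange 0 ((m : Int) + 1) 1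
        = PySem.List.pyRange 0 (m : Int) 1 ++ [(m : Int)] :=
      PySem.List.pyRange_one_succ_right (by positivity)
    have hsum : 2 * ((PySem.List.pyRange (m : Int) N 1).sum)
        = (N - (m : Int)) * (2 * (m : Int) + (N - (m : Int)) - 1) := by
      have := pv_sum_pyRange (m : Int) (N - (m : Int)).toNat
      rw [show ((N - (m : Int)).toNat : Int) = N - (m : Int) by omega] at this
      rw [show (m : Int) + (N - (m : Int)) = N by ring] at this
      exact this
    push_cast
    rw [hr]
    simp only [List.map_append, List.map_cons, List.map_nil, List.sum_append,
      List.sum_cons, List.sum_nil]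
    have ihm := ih hm'
    push_cast at ihm
    linear_combination ihm + 3 * hsum

-- A's nested foldl equals the map-sum form
theorem pv_A_sum (N : Int) (h : ¬ N < 0) :
    Sometimes_2 N = ((PySem.List.pyRange 0 (N - 1) 1).map
        (fun i => (PySem.List.pyRange i N 1).sum)).sum := by
  unfold Sometimes_2
  rw [if_neg h]
  have hfun : (fun (s i : Int) => (PySem.List.pyRange i N 1).foldl (fun s j => s + j) s)
      = (fun (s i : Int) => s + (PySem.List.pyRange i N 1).sum) := by
    funext s i
    have := PySem.List.foldl_add (l := PySem.List.pyRange i N 1) (a := s) (g := fun j => j)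
    simpa using this
  rw [hfun]
  have := PySem.List.foldl_add (l := PySem.List.pyRange 0 (N - 1) 1) (a := (0 : Int))
    (g := fun i => (PySem.List.pyRange i N 1).sum)
  simpa using this

-- ===== VERDICT (by name: the statement is the Claim_ definition above) =====
theorem Sometimes_2_spec : Claim_equal_Sometimes_2 := by
  intro N _
  unfold Spec_Sometimes_2 Sometimes_2_alt
  by_cases h2 : N < 2
  · rw [if_pos h2]
    unfold Sometimes_2
    by_cases h0 : N < 0
    · rw [if_pos h0]
    · rw [if_neg h0, PySem.List.pyRange_one_eq_nil (by omega)]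
      rfl
  · rw [if_neg h2]
    have h0 : ¬ N < 0 := by omega
    have hA := pv_A_sum N h0
    have hm : ((N - 1).toNat : Int) = N - 1 := by omega
    have houter := pv_outer N (N - 1).toNat (by omega)
    rw [hm] at houter
    have h6 : 6 * Sometimes_2 N
        = (N - 1) * (3 * N * (N - 1) - (N - 2) * (N - 3)) := by
      rw [hA]
      linear_combination houter
    rw [PySem.Int.floordiv_eq_ediv_of_pos (by norm_num)]
    rw [← h6]
    rw [show (6 : Int) * Sometimes_2 N = 6 * Sometimes_2 N by ring]
    exact (Int.mul_ediv_cancel_left _ (by norm_num)).symm
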